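-- pv_equiv track=rewrite | github.com/tickervoice/tickervoice | downloads/UsrTeleVoiceNoRelay.py | replace_commas_in_brackets
-- ===== SOURCE A (Python) =====
-- def replace_commas_in_brackets(key_value_list):
--     updated_list = []
--     for item in key_value_list:
--         modified = []
--         inside_brackets = False
--         for char in item:
--             if char == "[":
--                 inside_brackets = True
--             elif char == "]":
--                 inside_brackets = False
--             if inside_brackets and char == ",":
--                 modified.append(":")
--             else:
--                 modified.append(char)
--         updated_list.append("".join(modified))
--     return updated_list
-- ===== SOURCE B (Python) =====
-- def replace_commas_in_brackets(key_value_list):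
--     # Segment-based: jump from '[' to ']' with str.partition instead of a
--     # char-by-char scan with a boolean flag; commas are replaced wholesale
--     # inside each bracketed segment.
--     out = []
--     for item in key_value_list:
--         parts = []
--         rest = item
--         while True:
--             pre, sep, rest = rest.partition('[')
--             parts.append(pre)
--             if not sep:
--                 break
--             inside, close, rest = rest.partition(']')
--             parts.append('[' + inside.replace(',', ':') + close)
--         out.append(''.join(parts))
--     return out
-- ===== Notes on version B (the rewrite author's own statement) =====
-- stated objective: idiomatic
-- what changed: Replaced the char-by-char scan with a boolean inside_brackets flag by a segment-based rewrite: str.partition jumps to each '[' and the matching ']', and commas are replaced wholesale inside each bracketed segment.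
import Mathlib
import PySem

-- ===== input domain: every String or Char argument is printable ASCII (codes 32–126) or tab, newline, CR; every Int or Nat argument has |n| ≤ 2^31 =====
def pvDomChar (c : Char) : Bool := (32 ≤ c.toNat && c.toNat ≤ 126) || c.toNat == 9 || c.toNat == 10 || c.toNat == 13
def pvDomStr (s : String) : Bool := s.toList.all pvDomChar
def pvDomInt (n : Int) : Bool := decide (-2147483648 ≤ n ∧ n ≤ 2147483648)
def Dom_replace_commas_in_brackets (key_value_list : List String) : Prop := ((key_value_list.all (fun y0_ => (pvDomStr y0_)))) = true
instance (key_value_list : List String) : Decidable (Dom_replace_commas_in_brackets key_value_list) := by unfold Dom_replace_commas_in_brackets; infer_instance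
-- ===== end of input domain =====

-- B replaces A's char-by-char scan with a boolean state flag by a segment-based rewrite
-- (partition at '[' and ']', replace commas wholesale inside each bracketed segment): simpler/idiomatic.

-- ===== PORT A =====
-- inner loop state: (modified chars so far, inside_brackets flag)
def replace_commas_in_brackets (key_value_list : List String) : List String :=
  key_value_list.foldl
    (fun updated_list item =>
      let st := item.toList.foldl
        (fun (p : List Char × Bool) char =>
          let inside := if char = '[' then true else if char = ']' then false else p.2
          (p.1 ++ [if inside && char = ',' then ':' else char], inside))
        ([], false)
      updated_list ++ [String.mk st.1]) []

-- ===== PORT B =====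
-- ','→':' applied inside a bracketed segment (Source B's inside.replace(',', ':'))
def pvAltRepl (c : Char) : Char := if c = ',' then ':' else c

-- Source B's partition loop: pre,sep,rest = rest.partition('['); inside,close,rest = rest.partition(']').
-- takeWhile/dropWhile at the delimiter play the role of str.partition.
def pvAltGo (cs : List Char) : List Char :=
  cs.takeWhile (· ≠ '[') ++
    match h : cs.dropWhile (· ≠ '[') with
    | [] => []
    | _ :: r =>
      '[' :: (r.takeWhile (· ≠ ']')).map pvAltRepl ++
        match h2 : r.dropWhile (· ≠ ']') with
        | [] => []
        | cl :: t => cl :: pvAltGo t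
termination_by cs.length
decreasing_by
  have ha : (cs.dropWhile (· ≠ '[')).length ≤ cs.length := List.length_dropWhile_le _ _
  have hb : (r.dropWhile (· ≠ ']')).length ≤ r.length := List.length_dropWhile_le _ _
  rw [h] at ha; rw [h2] at hb; simp at ha hb; omega

def replace_commas_in_brackets_alt (key_value_list : List String) : List String :=
  key_value_list.map (fun item => String.mk (pvAltGo item.toList))

-- ===== PRECONDITION & SPEC =====
def Spec_replace_commas_in_brackets (key_value_list : List String) (out : List String) : Prop := out = replace_commas_in_brackets_alt key_value_list
instance (key_value_list : List String) (out : List String) : Decidable (Spec_replace_commas_in_brackets key_value_list out) := by unfold Spec_replace_commas_in_brackets; infer_instance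

-- ===== CLAIM (what is proved, stated in full; the proofs are below) =====
def Claim_equal_replace_commas_in_brackets : Prop := ∀ (key_value_list : List String), Dom_replace_commas_in_brackets key_value_list → Spec_replace_commas_in_brackets key_value_list (replace_commas_in_brackets key_value_list)

-- ===== LEMMAS AND PROOFS =====

-- pvAltGo with the equation-proof binders of its matches dropped (plain matches, rewriting-friendly)
theorem pvAltGo_eq (cs : List Char) : pvAltGo cs =
    cs.takeWhile (· ≠ '[') ++
      match cs.dropWhile (· ≠ '[') with
      | [] => []
      | _ :: r =>
        '[' :: (r.takeWhile (· ≠ ']')).map pvAltRepl ++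
          match r.dropWhile (· ≠ ']') with
          | [] => []
          | cl :: t => cl :: pvAltGo t := by
  rw [pvAltGo]
  congr 1
  split <;> rename_i h <;> rw [h]
  congr 1
  split <;> rename_i h2 <;> rw [h2]

-- A's inner loop as a plain recursion emitting its output characters
def pvAGo (inside : Bool) : List Char → List Char
  | [] => []
  | c :: rest =>
    let i := if c = '[' then true else if c = ']' then false else inside
    (if i && c = ',' then ':' else c) :: pvAGo i rest

theorem pvFoldlA (cs : List Char) (acc : List Char) (inside : Bool) :
    (cs.foldl
      (fun (p : List Char × Bool) char =>
        let i := if char = '[' then true else if char = ']' then false else p.2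
        (p.1 ++ [if i && char = ',' then ':' else char], i)) (acc, inside)).1
    = acc ++ pvAGo inside cs := by
  induction cs generalizing acc inside with
  | nil => simp [pvAGo]
  | cons c rest ih =>
    simp only [List.foldl_cons, pvAGo, ih, List.append_assoc, List.singleton_append]

theorem pvAGo_true (cs : List Char) :
    pvAGo true cs =
      (cs.takeWhile (· ≠ ']')).map pvAltRepl ++ pvAGo false (cs.dropWhile (· ≠ ']')) := by
  induction cs with
  | nil => simp [pvAGo]
  | cons c rest ih =>
    by_cases hc : c = ']'
    · subst hc
      simp [pvAGo, List.takeWhile_cons, List.dropWhile_cons]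
    · by_cases hb : c = '['
      · subst hb
        simp [pvAGo, pvAltRepl, ih, hc, List.takeWhile_cons, List.dropWhile_cons]
      · simp [pvAGo, hb, hc, pvAltRepl, ih, List.takeWhile_cons, List.dropWhile_cons]

theorem pvAltGo_cons_ne (c : Char) (rest : List Char) (hc : c ≠ '[') :
    pvAltGo (c :: rest) = c :: pvAltGo rest := by
  rw [pvAltGo_eq, pvAltGo_eq]
  have ht : (c :: rest).takeWhile (· ≠ '[') = c :: rest.takeWhile (· ≠ '[') := by
    simp [List.takeWhile_cons, hc]
  have hd : (c :: rest).dropWhile (· ≠ '[') = rest.dropWhile (· ≠ '[') := by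
    simp [List.dropWhile_cons, hc]
  rw [ht, hd, List.cons_append]

theorem pvDropWhile_head {p : Char → Bool} (l : List Char) (c : Char) (t : List Char)
    (h : l.dropWhile p = c :: t) : p c = false := by
  induction l with
  | nil => simp at h
  | cons a l ih =>
    rw [List.dropWhile_cons] at h
    split at h
    · exact ih h
    · cases h; simpa using ‹¬ p c = true›

theorem pvAGo_false_eq (n : ℕ) (cs : List Char) (hn : cs.length ≤ n) :
    pvAGo false cs = pvAltGo cs := by
  induction n generalizing cs with
  | zero =>
    have : cs = [] := List.eq_nil_of_length_eq_zero (Nat.le_zero.mp hn)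
    subst this; simp [pvAGo, pvAltGo_eq]
  | succ n ih =>
    cases cs with
    | nil => simp [pvAGo, pvAltGo_eq]
    | cons c rest =>
      by_cases hb : c = '['
      · subst hb
        have hlhs : pvAGo false ('[' :: rest) = '[' :: pvAGo true rest := by
          simp [pvAGo]
        rw [hlhs, pvAGo_true, pvAltGo_eq]
        have ht : ('[' :: rest).takeWhile (· ≠ '[') = [] := by
          simp [List.takeWhile_cons]
        have hd : ('[' :: rest).dropWhile (· ≠ '[') = '[' :: rest := by
          simp [List.dropWhile_cons]
        rw [ht, hd]
        simp only [List.nil_append, List.cons_append, List.cons.injEq, true_and]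
        congr 1
        cases h : rest.dropWhile (· ≠ ']') with
        | nil => simp [pvAGo]
        | cons cl t =>
          have hcl : cl = ']' := by
            have := pvDropWhile_head rest cl t h
            simpa using this
          subst hcl
          have hlen : t.length ≤ n := by
            have h3 : (rest.dropWhile (· ≠ ']')).length ≤ rest.length :=
              List.length_dropWhile_le _ _
            rw [h] at h3
            simp at hn h3; omega
          have hstep : pvAGo false (']' :: t) = ']' :: pvAGo false t := by simp [pvAGo]
          rw [hstep, ih t hlen]
      · have hlen : rest.length ≤ n := by simp at hn; omega
        rw [pvAltGo_cons_ne c rest hb]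
        have hstep : pvAGo false (c :: rest) = c :: pvAGo false rest := by
          by_cases hr : c = ']' <;> simp [pvAGo, hb, hr]
        rw [hstep, ih rest hlen]

theorem pvItem_eq (item : String) :
    String.mk ((item.toList.foldl
      (fun (p : List Char × Bool) char =>
        let inside := if char = '[' then true else if char = ']' then false else p.2
        (p.1 ++ [if inside && char = ',' then ':' else char], inside)) ([], false)).1)
    = String.mk (pvAltGo item.toList) := by
  rw [pvFoldlA]
  simp [pvAGo_false_eq item.toList.length item.toList (le_refl _)]

-- ===== VERDICT (by name: the statement is the Claim_ definition above) =====
theorem replace_commas_in_brackets_spec : Claim_equal_replace_commas_in_brackets := by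
  intro key_value_list hdom
  unfold Spec_replace_commas_in_brackets replace_commas_in_brackets replace_commas_in_brackets_alt
  clear hdom
  induction key_value_list using List.reverseRecOn with
  | nil => rfl
  | append_singleton xs x ih =>
    rw [List.foldl_append, List.map_append, ← ih]
    simp only [List.foldl_cons, List.foldl_nil]
    congr 1
    exact congrArg (fun s => [s]) (pvItem_eq x)
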